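-- pv_equiv track=rewrite | github.com/yuen1996/stock_fundamental_dashboard | stock_fundamental_dashboard/config.py | _flatten_ratio_categories
-- ===== SOURCE A (Python) =====
-- SUMMARY_RATIO_CATEGORY_ORDER = [
--     "Margins",
--     "Returns",
--     "Efficiency & Working Capital",
--     "Liquidity & Leverage",
--     "Cash Flow",
--     "Operations / Industry KPIs",
--     "Income & Efficiency",            # (Non-financials: holds Three Fees Ratio)
--     "Three-Proportion (Banking)",     # 👈 NEW group for banks (NIM/C-I/Leverage)
--     "Asset Quality",                  # (Banking)
--     "Capital & Liquidity",            # (Banking)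
--     "Debt & Hedging",                 # (REITs)
--     "Portfolio Quality",              # (REITs)
--     "Distribution & Valuation",       # (REITs/Property)
--     "Valuation",
-- ]
--
-- def _flatten_ratio_categories(cat_dict: dict) -> dict:
--     """Flatten a category->(label->keys) dict into a single ordered dict."""
--     out = {}
--     # first in our preferred order
--     for sec in SUMMARY_RATIO_CATEGORY_ORDER:
--         for label, keys in cat_dict.get(sec, {}).items():
--             out[label] = keys
--     # then any categories not in the preferred order
--     for sec, items in cat_dict.items():
--         if sec not in SUMMARY_RATIO_CATEGORY_ORDER:
--             for label, keys in items.items():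
--                 out[label] = keys
--     return out
-- ===== SOURCE B (Python) =====
-- SUMMARY_RATIO_CATEGORY_ORDER = [
--     "Margins",
--     "Returns",
--     "Efficiency & Working Capital",
--     "Liquidity & Leverage",
--     "Cash Flow",
--     "Operations / Industry KPIs",
--     "Income & Efficiency",
--     "Three-Proportion (Banking)",
--     "Asset Quality",
--     "Capital & Liquidity",
--     "Debt & Hedging",
--     "Portfolio Quality",
--     "Distribution & Valuation",
--     "Valuation",
-- ]
--
-- def _flatten_ratio_categories(cat_dict: dict) -> dict:
--     """Flatten a category->(label->keys) dict into a single ordered dict."""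
--     rank = {sec: i for i, sec in enumerate(SUMMARY_RATIO_CATEGORY_ORDER)}
--     n = len(SUMMARY_RATIO_CATEGORY_ORDER)
--     out = {}
--     # stable sort: known categories in preferred order, unknown ones keep
--     # their insertion order at the sentinel rank n
--     for sec in sorted(cat_dict, key=lambda s: rank.get(s, n)):
--         out.update(cat_dict[sec])
--     return out
-- ===== Notes on version B (the rewrite author's own statement) =====
-- stated objective: simpler
-- what changed: Replaces A's two separate scans (preferred-order loop with per-category lookup, then a leftover loop over the dict) by one rank table plus a single stable sort of the categories, after which one pass copies label->keys into the output.
import Mathlib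
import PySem

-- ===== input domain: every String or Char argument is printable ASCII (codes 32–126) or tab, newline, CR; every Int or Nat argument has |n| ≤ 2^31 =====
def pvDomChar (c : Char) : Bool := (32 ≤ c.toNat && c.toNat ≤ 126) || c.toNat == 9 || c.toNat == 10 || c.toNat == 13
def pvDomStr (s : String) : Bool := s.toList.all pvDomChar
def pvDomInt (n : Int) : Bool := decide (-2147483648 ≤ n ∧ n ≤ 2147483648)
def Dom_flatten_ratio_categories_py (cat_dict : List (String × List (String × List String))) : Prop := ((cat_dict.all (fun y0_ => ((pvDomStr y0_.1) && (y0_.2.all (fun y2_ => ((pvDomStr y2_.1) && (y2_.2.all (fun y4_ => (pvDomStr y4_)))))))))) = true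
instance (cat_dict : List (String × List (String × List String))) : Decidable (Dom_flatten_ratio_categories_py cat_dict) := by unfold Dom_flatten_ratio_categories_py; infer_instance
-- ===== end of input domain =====

-- B replaces A's two scans (preferred-order loop + leftover loop) by a rank
-- table and one stable sort of the category keys; objective: simpler.

-- ===== PORT A =====
def pvOrder : List String := [
  "Margins",
  "Returns",
  "Efficiency & Working Capital",
  "Liquidity & Leverage",
  "Cash Flow",
  "Operations / Industry KPIs",
  "Income & Efficiency",
  "Three-Proportion (Banking)",
  "Asset Quality",
  "Capital & Liquidity",
  "Debt & Hedging",
  "Portfolio Quality",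
  "Distribution & Valuation",
  "Valuation"]

-- cat_dict.get(sec, {}): first-match lookup with default {} (shared by both
-- ports: A's .get(sec, {}) and B's cat_dict[sec], which never misses there)
def pvGetD (l : List (String × List (String × List String))) (k : String) :
    List (String × List String) :=
  match l with
  | [] => []
  | p :: rest => if p.1 == k then p.2 else pvGetD rest k

def flatten_ratio_categories_py (cat_dict : List (String × List (String × List String))) : List (String × List String) :=
  -- out = {}; for sec in SUMMARY_RATIO_CATEGORY_ORDER: for label, keys in cat_dict.get(sec, {}).items(): out[label] = keys
  let out : PySem.Dict String (List String) :=
    pvOrder.foldl (fun o sec =>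
      (pvGetD cat_dict sec).foldl (fun o2 lk => o2.insert lk.1 lk.2) o) PySem.Dict.empty
  -- for sec, items in cat_dict.items(): if sec not in SUMMARY_RATIO_CATEGORY_ORDER: for label, keys in items.items(): out[label] = keys
  let out : PySem.Dict String (List String) :=
    cat_dict.foldl (fun o p =>
      if pvOrder.contains p.1 = false then
        p.2.foldl (fun o2 lk => o2.insert lk.1 lk.2) o
      else o) out
  out.items

-- ===== PORT B =====
def flatten_ratio_categories_py_alt (cat_dict : List (String × List (String × List String))) : List (String × List String) :=
  -- rank = {sec: i for i, sec in enumerate(SUMMARY_RATIO_CATEGORY_ORDER)}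
  let rank : PySem.Dict String Int :=
    PySem.Dict.ofList ((PySem.List.enumerate pvOrder 0).map (fun p => (p.2, p.1)))
  -- n = len(SUMMARY_RATIO_CATEGORY_ORDER)
  let n : Int := (pvOrder.length : Int)
  -- for sec in sorted(cat_dict, key=lambda s: rank.get(s, n)): out.update(cat_dict[sec])
  let out : PySem.Dict String (List String) :=
    (PySem.List.sorted (cat_dict.map Prod.fst) (fun s => rank.getD s n) false).foldl
      (fun o sec => (pvGetD cat_dict sec).foldl (fun o2 lk => o2.insert lk.1 lk.2) o)
      PySem.Dict.empty
  out.items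

-- ===== PRECONDITION & SPEC =====
-- Pre_ excludes association lists with duplicate outer (category) keys: those do
-- not encode any Python dict (dict construction collapses them, last value
-- winning), so the ports' first-match reading of them is accidental.
def Pre_flatten_ratio_categories_py (cat_dict : List (String × List (String × List String))) : Prop :=
  (cat_dict.map Prod.fst).Nodup
instance (cat_dict : List (String × List (String × List String))) : Decidable (Pre_flatten_ratio_categories_py cat_dict) := by unfold Pre_flatten_ratio_categories_py; infer_instance

def pvWitness_flatten_ratio_categories_py : (List (String × List (String × List String))) :=
  [("Valuation", [("P/E", ["pe"])]), ("Zeta", [("Z Score", ["z"]), ("P/E", ["pe2"])])]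

def Spec_flatten_ratio_categories_py (cat_dict : List (String × List (String × List String))) (out : List (String × List String)) : Prop := out = flatten_ratio_categories_py_alt cat_dict
instance (cat_dict : List (String × List (String × List String))) (out : List (String × List String)) : Decidable (Spec_flatten_ratio_categories_py cat_dict out) := by unfold Spec_flatten_ratio_categories_py; infer_instance

-- ===== CLAIM (what is proved, stated in full; the proofs are below) =====
def Claim_equal_flatten_ratio_categories_py : Prop := ∀ (cat_dict : List (String × List (String × List String))), Dom_flatten_ratio_categories_py cat_dict → Pre_flatten_ratio_categories_py cat_dict → Spec_flatten_ratio_categories_py cat_dict (flatten_ratio_categories_py cat_dict)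

-- ===== LEMMAS AND PROOFS =====

-- abbreviations used only by the proofs
def pvRank : PySem.Dict String Int :=
  PySem.Dict.ofList ((PySem.List.enumerate pvOrder 0).map (fun p => (p.2, p.1)))
def pvRk (s : String) : Int := pvRank.getD s ((pvOrder.length : Int))

lemma pvRk_lt_of_mem {s : String} (h : s ∈ pvOrder) : pvRk s < 14 := by
  fin_cases h <;> decide

lemma pvRank_items : pvRank.items = [("Margins",(0:Int)),("Returns",1),("Efficiency & Working Capital",2),("Liquidity & Leverage",3),("Cash Flow",4),("Operations / Industry KPIs",5),("Income & Efficiency",6),("Three-Proportion (Banking)",7),("Asset Quality",8),("Capital & Liquidity",9),("Debt & Hedging",10),("Portfolio Quality",11),("Distribution & Valuation",12),("Valuation",13)] := by decide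

lemma pvRk_of_not_mem {s : String} (h : pvOrder.contains s = false) : pvRk s = 14 := by
  have hs : s ∉ pvOrder := by simpa using h
  have hnone : pvRank.get? s = none := by
    have hf : List.find? (fun p => p.1 == s) pvRank.items = none := by
      rw [List.find?_eq_none]
      intro p hp
      rw [pvRank_items] at hp
      simp only [List.mem_cons, List.not_mem_nil, or_false] at hp
      rcases hp with rfl|rfl|rfl|rfl|rfl|rfl|rfl|rfl|rfl|rfl|rfl|rfl|rfl|rfl <;>
        (intro he; exact hs ((beq_iff_eq.mp he) ▸ (by decide)))
    simp [PySem.Dict.get?, hf]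
  unfold pvRk PySem.Dict.getD
  rw [hnone]
  rfl

lemma pvRk_le (s : String) : pvRk s ≤ 14 := by
  by_cases h : pvOrder.contains s = true
  · have := pvRk_lt_of_mem (by simpa using h); omega
  · rw [pvRk_of_not_mem (by simpa using h)]

lemma pvOrder_pairwise : pvOrder.Pairwise (fun a b => pvRk a < pvRk b) := by decide

-- a nested "for sec: for item in f sec: g" fold equals folding over the flattening
lemma foldl_nested {β γ : Type} (f : String → List γ) (g : β → γ → β) :
    ∀ (l : List String) (init : β),
      l.foldl (fun o sec => (f sec).foldl g o) init = ((l.flatMap f).foldl g init) := by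
  intro l
  induction l with
  | nil => intro init; rfl
  | cons x xs ih => intro init; simp [List.flatMap_cons, List.foldl_append, ih]

-- A's second loop: fold with the membership guard = fold over the flattened filter
lemma foldl_guard {β : Type} (g : β → (String × List String) → β) :
    ∀ (l : List (String × List (String × List String))) (init : β),
      l.foldl (fun o p => if pvOrder.contains p.1 = false then p.2.foldl g o else o) init
        = ((l.filter (fun p => !pvOrder.contains p.1)).flatMap (·.2)).foldl g init := by
  intro l
  induction l with
  | nil => intro init; rfl
  | cons x xs ih =>
      intro init
      rw [List.foldl_cons, List.filter_cons]
      by_cases h : pvOrder.contains x.1 = false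
      · rw [if_pos h, show (!pvOrder.contains x.1) = true by rw [h]; rfl, if_pos rfl,
          List.flatMap_cons, List.foldl_append, ih]
      · have h' : pvOrder.contains x.1 = true := by
          revert h; cases pvOrder.contains x.1 <;> simp
        rw [if_neg h, show (!pvOrder.contains x.1) = false by rw [h']; rfl]
        simp only [Bool.false_eq_true, if_false]
        exact ih init

lemma pvGetD_eq_nil {cd : List (String × List (String × List String))} {s : String}
    (h : (cd.map Prod.fst).contains s = false) : pvGetD cd s = [] := by
  induction cd with
  | nil => rfl
  | cons p rest ih =>
      simp only [List.map_cons, List.contains_cons, Bool.or_eq_false_iff] at h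
      simp only [pvGetD]
      rw [if_neg (by simpa [BEq.comm] using h.1)]
      exact ih h.2

lemma pvGetD_of_mem {cd : List (String × List (String × List String))}
    (hnd : (cd.map Prod.fst).Nodup) {p : String × List (String × List String)} (hp : p ∈ cd) :
    pvGetD cd p.1 = p.2 := by
  induction cd with
  | nil => cases hp
  | cons q rest ih =>
      simp only [List.map_cons, List.nodup_cons] at hnd
      rcases List.mem_cons.mp hp with h | h
      · subst h; simp [pvGetD]
      · have hne : (q.1 == p.1) = false := by
          apply beq_false_of_ne
          intro he
          exact hnd.1 (he ▸ List.mem_map_of_mem h)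
        simp only [pvGetD, hne]
        exact ih hnd.2 h

-- dropping sections whose lookup is empty does not change the flattening
lemma flatMap_filter_getD (cd : List (String × List (String × List String))) :
    pvOrder.flatMap (pvGetD cd)
      = (pvOrder.filter (fun s => (cd.map Prod.fst).contains s)).flatMap (pvGetD cd) := by
  suffices h : ∀ (l : List String), l.flatMap (pvGetD cd)
      = (l.filter (fun s => (cd.map Prod.fst).contains s)).flatMap (pvGetD cd) from h pvOrder
  intro l
  induction l with
  | nil => rfl
  | cons x xs ih =>
      rw [List.flatMap_cons, List.filter_cons]
      by_cases hx : (cd.map Prod.fst).contains x = true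
      · rw [if_pos hx, List.flatMap_cons, ih]
      · have hf : (cd.map Prod.fst).contains x = false := by
          revert hx; cases (cd.map Prod.fst).contains x <;> simp
        rw [if_neg (by rw [hf]; simp), pvGetD_eq_nil hf, List.nil_append, ih]

-- stable sort with all keys ≤ m splits off the maximal fiber, in input order
lemma insertBy_append_of_before {α : Type} (before : α → α → Bool) (x : α) :
    ∀ (S F : List α), (∀ y ∈ F, before x y = true) →
      PySem.List.insertBy before x (S ++ F) = PySem.List.insertBy before x S ++ F := by
  intro S
  induction S with
  | nil =>
      intro F h
      cases F with
      | nil => rfl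
      | cons z zs => simp [PySem.List.insertBy, h z (by simp)]
  | cons y ys ih =>
      intro F h
      by_cases hy : before x y = true
      · simp [PySem.List.insertBy, hy]
      · simp only [List.cons_append, PySem.List.insertBy, Bool.not_eq_true] at *
        rw [if_neg (by simp [hy]), if_neg (by simp [hy]), ih F h]
        simp

lemma sorted_split {α : Type} (key : α → Int) (m : Int) :
    ∀ (xs : List α), (∀ x ∈ xs, key x ≤ m) →
      PySem.List.sorted xs key false
        = PySem.List.sorted (xs.filter (fun x => decide (key x < m))) key false
          ++ xs.filter (fun x => !decide (key x < m)) := by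
  intro xs
  induction xs using List.reverseRecOn with
  | nil => intro _; rfl
  | append_singleton xs x ih =>
      intro h
      have hxs : ∀ y ∈ xs, key y ≤ m := fun y hy => h y (by simp [hy])
      have hx : key x ≤ m := h x (by simp)
      rw [PySem.List.sorted_eq_foldl_insertBy, List.foldl_append,
        ← PySem.List.sorted_eq_foldl_insertBy, List.foldl_cons, List.foldl_nil, ih hxs,
        List.filter_append, List.filter_append]
      by_cases hlt : key x < m
      · rw [show ([x] : List α).filter (fun x => decide (key x < m)) = [x] from by simp [hlt],
          show ([x] : List α).filter (fun x => !decide (key x < m)) = [] from by simp [hlt],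
          List.append_nil,
          insertBy_append_of_before _ x _ _ (by
            intro y hy
            simp only [List.mem_filter, Bool.not_eq_true', decide_eq_false_iff_not, not_lt] at hy
            simp only [decide_eq_true_eq]
            omega),
          PySem.List.sorted_eq_foldl_insertBy (xs.filter (fun x => decide (key x < m)) ++ [x]),
          List.foldl_append, List.foldl_cons, List.foldl_nil,
          ← PySem.List.sorted_eq_foldl_insertBy]
      · rw [show ([x] : List α).filter (fun x => decide (key x < m)) = [] from by simp [hlt],
          List.append_nil,
          show ([x] : List α).filter (fun x => !decide (key x < m)) = [x] from by simp [hlt],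
          PySem.List.insertBy_of_forall_not_before _ x _ (by
            intro y hy
            rcases List.mem_append.mp hy with hy | hy
            · have := hxs y ((PySem.List.mem_sorted _ _ _ _).mp hy |> List.mem_of_mem_filter)
              simp only [decide_eq_false_iff_not, not_lt]; omega
            · have := hxs y (List.mem_of_mem_filter hy)
              simp only [decide_eq_false_iff_not, not_lt]; omega),
          List.append_assoc]

-- the sorted key list of B, characterised
lemma sorted_keys (cd : List (String × List (String × List String)))
    (hnd : (cd.map Prod.fst).Nodup) :
    PySem.List.sorted (cd.map Prod.fst) pvRk false
      = pvOrder.filter (fun s => (cd.map Prod.fst).contains s)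
        ++ (cd.map Prod.fst).filter (fun s => !pvOrder.contains s) := by
  rw [sorted_split pvRk 14 (cd.map Prod.fst) (fun s _ => pvRk_le s)]
  congr 1
  · apply PySem.List.sorted_eq_of_perm_of_pairwise_lt
    · rw [List.perm_ext_iff_of_nodup ((by decide : pvOrder.Nodup).filter _) (hnd.filter _)]
      intro s
      simp only [List.mem_filter, List.contains_iff_mem, decide_eq_true_eq]
      constructor
      · rintro ⟨ho, hk⟩
        exact ⟨hk, pvRk_lt_of_mem ho⟩
      · rintro ⟨hk, hr⟩
        refine ⟨?_, hk⟩
        by_contra ho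
        rw [pvRk_of_not_mem (by simpa using ho)] at hr
        omega
    · exact pvOrder_pairwise.filter _
  · apply List.filter_congr
    intro s _
    by_cases hc : pvOrder.contains s = true
    · have hom : s ∈ pvOrder := by simpa using hc
      have := pvRk_lt_of_mem hom
      simp [this, hom]
    · have hf : pvOrder.contains s = false := by
        revert hc; cases pvOrder.contains s <;> simp
      have hom : s ∉ pvOrder := by simpa using hf
      have := pvRk_of_not_mem hf
      simp [this, hom]

-- the two flattened insertion sequences are equal
lemma flatMap_congr_snd {cd : List (String × List (String × List String))}
    (hnd : (cd.map Prod.fst).Nodup) (P : String × List (String × List String) → Bool) :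
    (cd.filter P).flatMap (fun p => pvGetD cd p.1) = (cd.filter P).flatMap (·.2) := by
  apply List.flatMap_congr
  intro p hp
  exact pvGetD_of_mem hnd (List.mem_of_mem_filter hp)

-- ===== VERDICT (by name: the statement is the Claim_ definition above) =====
theorem flatten_ratio_categories_py_spec : Claim_equal_flatten_ratio_categories_py := by
  intro cd _ hnd
  unfold Spec_flatten_ratio_categories_py
  show (cd.foldl (fun o p => if pvOrder.contains p.1 = false then p.2.foldl (fun o2 lk => o2.insert lk.1 lk.2) o else o)
      (pvOrder.foldl (fun o sec => (pvGetD cd sec).foldl (fun o2 lk => o2.insert lk.1 lk.2) o) PySem.Dict.empty)).items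
    = ((PySem.List.sorted (cd.map Prod.fst) pvRk false).foldl
        (fun o sec => (pvGetD cd sec).foldl (fun o2 lk => o2.insert lk.1 lk.2) o) PySem.Dict.empty).items
  rw [foldl_nested, foldl_nested, foldl_guard,
    sorted_keys cd hnd, List.flatMap_append, List.foldl_append,
    ← flatMap_filter_getD cd,
    show (cd.map Prod.fst).filter (fun s => !pvOrder.contains s)
        = (cd.filter (fun p => !pvOrder.contains p.1)).map Prod.fst from by
      rw [List.filter_map]; rfl,
    List.flatMap_map,
    flatMap_congr_snd hnd]
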